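-- pv_equiv track=rewrite | github.com/These-SCAI2023/L6SOPROG | REMISE_ETUDIANTS/L6SOPRG2 -TD1-88437/Yeleen Canonge_34304_assignsubmission_file/21102275/21102276/TD1P2.py | estimer_langue
-- ===== SOURCE A (Python) =====
-- def estimer_langue(trigrammes, dic_langues):
--     score_langues = {}
--
--     for langue, dic_trigrammes in dic_langues.items():
--         trigrammes_langue = set(dic_trigrammes)
--         intersection = trigrammes_langue.intersection(trigrammes)
--         score_langues[langue] = len(intersection)
--
--     langue_estimee = max(score_langues, key=score_langues.get)
--     return langue_estimee
-- ===== SOURCE B (Python) =====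
-- def estimer_langue(trigrammes, dic_langues):
--     # Inverted index: trigram -> list of languages whose model contains it.
--     index = {}
--     for langue, dic_trigrammes in dic_langues.items():
--         for t in set(dic_trigrammes):
--             index.setdefault(t, []).append(langue)
--     # Tally one vote per distinct query trigram for each language that has it.
--     votes = {}
--     for t in set(trigrammes):
--         for langue in index.get(t, []):
--             votes[langue] = votes.get(langue, 0) + 1
--     # Running argmax over the languages in their original order (strict >: first max wins).
--     best_langue, best_score = None, -1
--     for langue in dic_langues:
--         s = votes.get(langue, 0)
--         if s > best_score:
--             best_langue, best_score = langue, s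
--     if best_langue is None:
--         raise ValueError("estimer_langue: empty dic_langues")
--     return best_langue
-- ===== Notes on version B (the rewrite author's own statement) =====
-- stated objective: alternative
-- what changed: B inverts the data flow: it builds an inverted index mapping each trigram to the list of languages whose model contains it, then tallies one vote per distinct query trigram into a votes table via that index, and finally picks the first language with the maximal vote count by a running argmax - instead of A's per-language set-intersection scoring followed by max over a score dictionary.
import Mathlib
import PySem

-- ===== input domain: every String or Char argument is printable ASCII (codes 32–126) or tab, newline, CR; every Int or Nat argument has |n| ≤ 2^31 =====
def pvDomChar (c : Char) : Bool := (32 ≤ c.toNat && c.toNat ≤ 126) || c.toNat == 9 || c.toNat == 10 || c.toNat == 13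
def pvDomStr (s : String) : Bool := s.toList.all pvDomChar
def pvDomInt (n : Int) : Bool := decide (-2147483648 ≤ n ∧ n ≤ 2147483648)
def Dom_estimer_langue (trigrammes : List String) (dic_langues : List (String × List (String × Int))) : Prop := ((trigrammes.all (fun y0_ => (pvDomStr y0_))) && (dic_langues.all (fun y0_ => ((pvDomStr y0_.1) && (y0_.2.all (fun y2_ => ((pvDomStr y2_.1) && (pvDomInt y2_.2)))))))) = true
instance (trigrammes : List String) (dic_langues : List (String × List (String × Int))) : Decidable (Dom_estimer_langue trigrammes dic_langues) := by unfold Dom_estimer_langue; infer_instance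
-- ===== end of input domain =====

-- One honest line: B scores by an inverted index (trigram → languages) and vote tallying
-- with a running argmax, instead of A's per-language set intersection + max over a score dict.

-- ===== PORT A =====
def estimer_langue (trigrammes : List String) (dic_langues : List (String × List (String × Int))) : String :=
  let score_langues : PySem.Dict String Int :=
    (PySem.Dict.ofList dic_langues).items.foldl
      (fun sc kv =>
        let trigrammes_langue := PySem.Set.ofList (kv.2.map Prod.fst)
        let intersection := PySem.Set.inter trigrammes_langue trigrammes
        sc.insert kv.1 (intersection.length : Int))
      PySem.Dict.empty
  -- Python's max over an empty dict raises ValueError: excluded by Pre_ below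
  (PySem.List.max? score_langues.keys (fun k => score_langues.getD k 0)).getD ""

-- ===== PORT B =====
def estimer_langue_alt (trigrammes : List String) (dic_langues : List (String × List (String × Int))) : String :=
  -- inverted index: trigram → list of languages whose model contains it
  let index : PySem.Dict String (List String) :=
    (PySem.Dict.ofList dic_langues).items.foldl
      (fun idx kv =>
        (PySem.Set.ofList (kv.2.map Prod.fst)).foldl
          (fun idx t => idx.modify t [] (· ++ [kv.1])) idx)
      PySem.Dict.empty
  -- one vote per distinct query trigram for each language that has it
  let votes : PySem.Dict String Int :=
    (PySem.Set.ofList trigrammes).foldl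
      (fun v t => (index.getD t []).foldl (fun v l => v.modify l 0 (· + 1)) v)
      PySem.Dict.empty
  -- running argmax over the languages in order (strict <: first maximum wins)
  let best :=
    (PySem.Dict.ofList dic_langues).keys.foldl
      (fun (best : String × Int) l =>
        let s := votes.getD l 0
        if best.2 < s then (l, s) else best)
      ("", -1)
  -- Python B raises ValueError when dic_langues is empty: excluded by Pre_ below
  best.1

-- ===== PRECONDITION & SPEC =====
-- Pre_ excludes the empty dic_langues, on which both A (max of empty dict) and B raise ValueError.
def Pre_estimer_langue (trigrammes : List String) (dic_langues : List (String × List (String × Int))) : Prop :=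
  dic_langues ≠ []
instance (trigrammes : List String) (dic_langues : List (String × List (String × Int))) : Decidable (Pre_estimer_langue trigrammes dic_langues) := by unfold Pre_estimer_langue; infer_instance

def pvWitness_estimer_langue : List String × (List (String × List (String × Int))) :=
  (["abc", "xyz"], [("fr", [("abc", 3)]), ("en", [("abc", 1), ("xyz", 2)])])

def Spec_estimer_langue (trigrammes : List String) (dic_langues : List (String × List (String × Int))) (out : String) : Prop := out = estimer_langue_alt trigrammes dic_langues
instance (trigrammes : List String) (dic_langues : List (String × List (String × Int))) (out : String) : Decidable (Spec_estimer_langue trigrammes dic_langues out) := by unfold Spec_estimer_langue; infer_instance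

-- ===== CLAIM (what is proved, stated in full; the proofs are below) =====
def Claim_equal_estimer_langue : Prop := ∀ (trigrammes : List String) (dic_langues : List (String × List (String × Int))), Dom_estimer_langue trigrammes dic_langues → Pre_estimer_langue trigrammes dic_langues → Spec_estimer_langue trigrammes dic_langues (estimer_langue trigrammes dic_langues)

-- ===== LEMMAS AND PROOFS =====

-- Abbreviations (proof-side names for the terms the two ports build).
def pvKset (kv : String × List (String × Int)) : List String :=
  PySem.Set.ofList (kv.2.map Prod.fst)

def pvScore (tr : List String) (kv : String × List (String × Int)) : Int :=
  ((PySem.Set.inter (pvKset kv) tr).length : Int)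

def pvScDict (tr : List String) (items : List (String × List (String × Int))) : PySem.Dict String Int :=
  items.foldl (fun sc kv => sc.insert kv.1 (pvScore tr kv)) PySem.Dict.empty

def pvIndex (items : List (String × List (String × Int))) : PySem.Dict String (List String) :=
  items.foldl
    (fun idx kv => (pvKset kv).foldl (fun idx t => idx.modify t [] (· ++ [kv.1])) idx)
    PySem.Dict.empty

def pvVotes (tr : List String) (items : List (String × List (String × Int))) : PySem.Dict String Int :=
  (PySem.Set.ofList tr).foldl
    (fun v t => ((pvIndex items).getD t []).foldl (fun v l => v.modify l 0 (· + 1)) v)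
    PySem.Dict.empty

-- A fold over a flatMap is the nested fold.
theorem pv_foldl_flatMap {α β γ : Type} (l : List α) (g : α → List β) (f : γ → β → γ) :
    ∀ i, (l.flatMap g).foldl f i = l.foldl (fun a x => (g x).foldl f a) i := by
  induction l with
  | nil => intro i; rfl
  | cons x t ih => intro i; simp only [List.flatMap_cons, List.foldl_append, List.foldl_cons, ih]

-- Python's max(keys, key=lookup) is the running-max loop over the keys, seeded with the first key.
theorem pv_fold_some (key : String → Int) :
    ∀ (ks : List String) (c : String),
      PySem.List.max? (c :: ks) key
        = some (ks.foldl (fun m x => if key m < key x then x else m) c) := by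
  intro ks
  induction ks with
  | nil => intro c; simp [PySem.List.max?]
  | cons x t ih =>
      intro c
      have e1 : PySem.List.max? (c :: x :: t) key
          = PySem.List.max? ((if key c < key x then x else c) :: t) key := by
        by_cases h : key c < key x <;> simp [PySem.List.max?, h]
      rw [e1, ih]
      simp [List.foldl_cons]

-- B's running (langue, score) argmax tracks the running argmax over the keys alone.
theorem pv_pair_fold (g : String → Int) :
    ∀ (t : List String) (m : String),
      t.foldl (fun (b : String × Int) k => if b.2 < g k then (k, g k) else b) (m, g m)
        = ((t.foldl (fun c x => if g c < g x then x else c) m),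
           g (t.foldl (fun c x => if g c < g x then x else c) m)) := by
  intro t
  induction t with
  | nil => intro m; rfl
  | cons x s ih =>
      intro m
      simp only [List.foldl_cons]
      by_cases h : g m < g x <;> simp [h, ih]

-- The per-trigram posting list of B's inverted index: the languages whose model contains t, in order.
theorem pv_indexlist (items : List (String × List (String × Int))) (t : String) :
    ((items.flatMap (fun kv => (pvKset kv).map (fun s => (s, kv.1)))).filter
        (fun p => p.1 == t)).map (fun p => p.2)
      = (items.filter (fun kv => PySem.Set.contains (pvKset kv) t)).map (fun kv => kv.1) := by
  induction items with
  | nil => rfl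
  | cons kv rest ih =>
      simp only [List.flatMap_cons, List.filter_append, List.map_append, ih, List.filter_cons]
      have hmap : ((pvKset kv).map (fun s => (s, kv.1))).filter (fun p => p.1 == t)
          = ((pvKset kv).filter (fun s => s == t)).map (fun s => (s, kv.1)) := by
        exact List.filter_map
      rw [hmap, List.filter_beq]
      have hnd : (pvKset kv).Nodup := PySem.Set.nodup_ofList _
      by_cases hm : t ∈ pvKset kv
      · have hc : (pvKset kv).count t = 1 := List.count_eq_one_of_mem hnd hm
        simp [hc, hm]
      · have hc : (pvKset kv).count t = 0 := List.count_eq_zero.mpr hm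
        simp [hc, hm]

-- Counting one element across a flatMap whose pieces contain it at most once.
theorem pv_count_flat (ws : List String) (F : String → List String) (l : String)
    (h : ∀ t, (F t).count l = if l ∈ F t then 1 else 0) :
    (ws.flatMap F).count l = ws.countP (fun t => decide (l ∈ F t)) := by
  induction ws with
  | nil => rfl
  | cons w rest ih =>
      simp only [List.flatMap_cons, List.count_append, ih, List.countP_cons, h w]
      by_cases hm : l ∈ F w <;> simp [hm, Nat.add_comm]

-- Two nodup lists of common elements: counting from either side gives the same number.
theorem pv_countP_symm (S W raw : List String) (hS : S.Nodup) (hW : W.Nodup)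
    (hWraw : ∀ x, x ∈ W ↔ x ∈ raw) :
    W.countP (fun t => PySem.Set.contains S t) = S.countP (fun x => PySem.Set.contains raw x) := by
  rw [List.countP_eq_length_filter, List.countP_eq_length_filter]
  apply List.Perm.length_eq
  apply (List.perm_ext_iff_of_nodup (hW.filter _) (hS.filter _)).mpr
  intro a
  simp only [List.mem_filter, PySem.Set.contains_eq_listContains, List.contains_iff_mem]
  constructor
  · rintro ⟨ha, hb⟩; exact ⟨by simpa using hb, by simpa [hWraw a] using ha⟩
  · rintro ⟨ha, hb⟩; exact ⟨by simpa [hWraw a] using hb, by simpa using ha⟩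

-- keys of a dict literal are the distinct first components, in first-seen order.
theorem pv_keys_ofList (dl : List (String × List (String × Int))) :
    (PySem.Dict.ofList dl).keys = PySem.Set.ofList (dl.map Prod.fst) := by
  rw [show (PySem.Dict.ofList dl) = dl.foldl (fun d p => d.insert p.1 p.2) PySem.Dict.empty from rfl]
  rw [PySem.Dict.keys_foldl_insert_key (key := Prod.fst) (f := fun d p => p.2)]
  simp [PySem.Dict.keys_empty, PySem.Set.update_nil_left]

-- A's score dict: its items, keys and lookups.
theorem pv_scdict_items (tr : List String) (items : List (String × List (String × Int)))
    (hnd : (items.map Prod.fst).Nodup) :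
    (pvScDict tr items).items = items.map (fun kv => (kv.1, pvScore tr kv)) := by
  unfold pvScDict
  have := PySem.Dict.items_foldl_insert_fresh (l := items) (k := Prod.fst)
      (v := pvScore tr) (d := PySem.Dict.empty)
      (by intro a _; simp [PySem.Dict.contains_empty]) hnd
  simpa using this

theorem pv_scdict_keys (tr : List String) (items : List (String × List (String × Int)))
    (hnd : (items.map Prod.fst).Nodup) :
    (pvScDict tr items).keys = items.map Prod.fst := by
  simp [PySem.Dict.keys, pv_scdict_items tr items hnd, Function.comp]

theorem pv_scdict_getD (tr : List String) (items : List (String × List (String × Int)))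
    (hnd : (items.map Prod.fst).Nodup) (kv : String × List (String × Int)) (hkv : kv ∈ items) :
    (pvScDict tr items).getD kv.1 0 = pvScore tr kv := by
  apply PySem.Dict.getD_of_mem_items
  · rw [pv_scdict_items tr items hnd]; exact List.mem_map_of_mem hkv
  · rw [pv_scdict_keys tr items hnd]; exact hnd

-- B's inverted index: each posting list is the filtered language list.
theorem pv_index_getD (items : List (String × List (String × Int))) (t : String) :
    (pvIndex items).getD t []
      = (items.filter (fun kv => PySem.Set.contains (pvKset kv) t)).map (fun kv => kv.1) := by
  have hflat : pvIndex items
      = (items.flatMap (fun kv => (pvKset kv).map (fun s => (s, kv.1)))).foldl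
          (fun d p => d.modify p.1 [] (· ++ [p.2])) PySem.Dict.empty := by
    unfold pvIndex
    rw [pv_foldl_flatMap]
    apply PySem.List.foldl_congr_mem
    intro acc kv _
    rw [List.foldl_map]
  rw [hflat, PySem.Dict.getD_foldl_modify_append, PySem.Dict.getD_empty]
  simpa using pv_indexlist items t

-- A's per-language score as a countP over the language model.
theorem pv_score_countP (tr : List String) (kv : String × List (String × Int)) :
    pvScore tr kv = (((pvKset kv).countP (fun x => PySem.Set.contains tr x) : Nat) : Int) := by
  unfold pvScore
  congr 1
  rw [List.countP_eq_length_filter]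
  rfl

-- B's votes at a language present in items equal A's score there.
theorem pv_votes_getD (tr : List String) (items : List (String × List (String × Int)))
    (hnd : (items.map Prod.fst).Nodup) (kv : String × List (String × Int)) (hkv : kv ∈ items) :
    (pvVotes tr items).getD kv.1 0 = pvScore tr kv := by
  have hflat : pvVotes tr items
      = ((PySem.Set.ofList tr).flatMap (fun t => (pvIndex items).getD t [])).foldl
          (fun v l => v.modify l 0 (· + 1)) PySem.Dict.empty := by
    unfold pvVotes
    rw [pv_foldl_flatMap]
  rw [hflat, PySem.Dict.getD_foldl_modify_add_one, PySem.Dict.getD_empty]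
  have hpostNd : ∀ t, ((pvIndex items).getD t []).Nodup := by
    intro t
    rw [pv_index_getD items t]
    exact hnd.sublist (List.Sublist.map Prod.fst List.filter_sublist)
  have hcnt : ∀ t, (((pvIndex items).getD t []).count kv.1)
      = if kv.1 ∈ (pvIndex items).getD t [] then 1 else 0 := by
    intro t
    by_cases hm : kv.1 ∈ (pvIndex items).getD t []
    · simp [hm, List.count_eq_one_of_mem (hpostNd t) hm]
    · simp [hm, List.count_eq_zero.mpr hm]
  rw [pv_count_flat (PySem.Set.ofList tr) (fun t => (pvIndex items).getD t []) kv.1 hcnt]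
  have hmemIff : ∀ t, (kv.1 ∈ (pvIndex items).getD t []) ↔ PySem.Set.contains (pvKset kv) t = true := by
    intro t
    rw [pv_index_getD items t]
    constructor
    · intro hm
      obtain ⟨kv', hkv', he⟩ := List.mem_map.mp hm
      obtain ⟨hkv'mem, hcond⟩ := List.mem_filter.mp hkv'
      have : kv' = kv := List.inj_on_of_nodup_map hnd hkv'mem hkv he
      rwa [← this]
    · intro hc
      exact List.mem_map_of_mem (List.mem_filter.mpr ⟨hkv, hc⟩)
  have hcp : (PySem.Set.ofList tr).countP (fun t => decide (kv.1 ∈ (pvIndex items).getD t []))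
      = (PySem.Set.ofList tr).countP (fun t => PySem.Set.contains (pvKset kv) t) := by
    apply List.countP_congr
    intro t _
    simp [hmemIff t]
  rw [hcp]
  rw [pv_countP_symm (pvKset kv) (PySem.Set.ofList tr) tr
      (PySem.Set.nodup_ofList _) (PySem.Set.nodup_ofList _)
      (fun x => PySem.Set.mem_ofList tr x)]
  rw [pv_score_countP]
  simp

-- Assembly: A's max-by-key over a nonempty key list equals B's running argmax,
-- when the two lookups agree on the keys and are nonnegative there.
theorem pv_assemble (g g' : String → Int) (ks : List String) (hne : ks ≠ [])
    (hagree : ∀ k ∈ ks, g' k = g k) (hnn : ∀ k ∈ ks, 0 ≤ g k) :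
    (PySem.List.max? ks g).getD ""
      = (ks.foldl (fun (b : String × Int) l => if b.2 < g' l then (l, g' l) else b) ("", -1)).1 := by
  cases ks with
  | nil => exact absurd rfl hne
  | cons k0 t =>
      rw [pv_fold_some g t k0, Option.getD_some]
      have hcongr : (k0 :: t).foldl (fun (b : String × Int) l => if b.2 < g' l then (l, g' l) else b) ("", -1)
          = (k0 :: t).foldl (fun (b : String × Int) l => if b.2 < g l then (l, g l) else b) ("", -1) := by
        apply PySem.List.foldl_congr_mem
        intro acc x hx
        rw [hagree x hx]
      rw [hcongr, List.foldl_cons]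
      have hpos : ((-1 : Int) < g k0) := lt_of_lt_of_le (by norm_num) (hnn k0 List.mem_cons_self)
      rw [if_pos hpos, pv_pair_fold g t k0]

-- The core equivalence.
theorem estimer_langue_eq_alt (trigrammes : List String)
    (dic_langues : List (String × List (String × Int)))
    (hne : dic_langues ≠ []) :
    estimer_langue trigrammes dic_langues = estimer_langue_alt trigrammes dic_langues := by
  unfold estimer_langue estimer_langue_alt
  show (PySem.List.max? (pvScDict trigrammes (PySem.Dict.ofList dic_langues).items).keys
          (fun k => (pvScDict trigrammes (PySem.Dict.ofList dic_langues).items).getD k 0)).getD ""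
      = ((PySem.Dict.ofList dic_langues).keys.foldl
          (fun (b : String × Int) l =>
            if b.2 < (pvVotes trigrammes (PySem.Dict.ofList dic_langues).items).getD l 0
            then (l, (pvVotes trigrammes (PySem.Dict.ofList dic_langues).items).getD l 0) else b)
          ("", -1)).1
  have hnd : ((PySem.Dict.ofList dic_langues).items.map Prod.fst).Nodup := by
    have := PySem.Dict.nodup_keys_ofList (κ := String) (ν := List (String × Int)) dic_langues
    simpa [PySem.Dict.keys] using this
  have hkeys : (PySem.Dict.ofList dic_langues).keys
      = (PySem.Dict.ofList dic_langues).items.map Prod.fst := by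
    simp [PySem.Dict.keys]
  have hnonempty : (PySem.Dict.ofList dic_langues).items.map Prod.fst ≠ [] := by
    rw [← hkeys, pv_keys_ofList]
    cases dic_langues with
    | nil => exact absurd rfl hne
    | cons p rest => simp [PySem.Set.ofList_cons]
  rw [pv_scdict_keys _ _ hnd, hkeys]
  apply pv_assemble _ _ _ hnonempty
  · intro k hk
    obtain ⟨kv, hkv, rfl⟩ := List.mem_map.mp hk
    rw [pv_votes_getD trigrammes _ hnd kv hkv, pv_scdict_getD trigrammes _ hnd kv hkv]
  · intro k hk
    obtain ⟨kv, hkv, rfl⟩ := List.mem_map.mp hk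
    rw [pv_scdict_getD trigrammes _ hnd kv hkv, pv_score_countP]
    exact Int.natCast_nonneg _

-- ===== VERDICT (by name: the statement is the Claim_ definition above) =====
theorem estimer_langue_spec : Claim_equal_estimer_langue := by
  intro trigrammes dic_langues _ hpre
  unfold Spec_estimer_langue
  exact estimer_langue_eq_alt trigrammes dic_langues hpre
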